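-- pv_equiv track=rewrite | github.com/Catman155/puppet-linter | utility.py | brace_count_verify
-- ===== SOURCE A (Python) =====
-- def brace_count_verify(content):
--     counter = 0
--     index = 0
--     while index < len(content):
--         if content[index] == '{':
--             counter += 1
--         if content[index] == '}':
--             counter -= 1
--         index += 1
--     return counter
-- ===== SOURCE B (Python) =====
-- def brace_count_verify(content):
--     # Partition the string at each kind of brace; a split at a separator that
--     # occurs k times yields k+1 pieces, so the difference of piece counts is
--     # the net brace balance (the +1's cancel).
--     return len(content.split('{')) - len(content.split('}'))
-- ===== Notes on version B (the rewrite author's own statement) =====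
-- stated objective: idiomatic
-- what changed: Replaces the index-walking accumulator loop with two str.split partitions whose piece counts are subtracted (k occurrences of a separator give k+1 pieces, so the +1's cancel).
import Mathlib
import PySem

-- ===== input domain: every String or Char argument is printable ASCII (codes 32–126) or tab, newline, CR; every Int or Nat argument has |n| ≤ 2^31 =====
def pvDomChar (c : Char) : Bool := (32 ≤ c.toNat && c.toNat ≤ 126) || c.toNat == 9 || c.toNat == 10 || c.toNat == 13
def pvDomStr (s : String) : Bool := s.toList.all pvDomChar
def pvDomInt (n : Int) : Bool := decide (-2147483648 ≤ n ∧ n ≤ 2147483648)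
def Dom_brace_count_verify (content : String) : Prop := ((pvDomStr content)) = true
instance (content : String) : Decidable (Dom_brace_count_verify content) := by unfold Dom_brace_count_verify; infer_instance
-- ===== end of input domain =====

-- B replaces A's index-walking accumulator loop with two str.split partitions whose piece counts are subtracted (idiomatic).

-- ===== PORT A =====
-- A walks the string front to back by index, updating one counter: ported as the
-- structurally identical left fold over the characters with the same two branch tests.
def brace_count_verify (content : String) : Int :=
  content.toList.foldl (fun counter ch =>
    let counter := if ch == '{' then counter + 1 else counter
    if ch == '}' then counter - 1 else counter) 0

-- ===== PORT B =====
-- len(content.split('{')) - len(content.split('}')); split with a nonempty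
-- separator is PySem.Chars.splitOn (exact Python semantics).
def brace_count_verify_alt (content : String) : Int :=
  ((PySem.Chars.splitOn content.toList ['{']).length : Int)
    - ((PySem.Chars.splitOn content.toList ['}']).length : Int)

-- ===== PRECONDITION & SPEC =====
def Spec_brace_count_verify (content : String) (out : Int) : Prop := out = brace_count_verify_alt content
instance (content : String) (out : Int) : Decidable (Spec_brace_count_verify content out) := by unfold Spec_brace_count_verify; infer_instance

-- ===== CLAIM (what is proved, stated in full; the proofs are below) =====
def Claim_equal_brace_count_verify : Prop := ∀ (content : String), Dom_brace_count_verify content → Spec_brace_count_verify content (brace_count_verify content)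

-- ===== LEMMAS AND PROOFS =====

-- Splitting at a one-character separator yields (count of the separator) + 1 pieces.
theorem splitOn_go_single_length (c : Char) :
    ∀ (fuel : Nat) (l cur : List Char) (acc : List (List Char)), l.length < fuel →
      (PySem.Chars.splitOn.go [c] fuel l cur acc).length = acc.length + 1 + l.count c := by
  intro fuel
  induction fuel with
  | zero => intro l cur acc h; omega
  | succ n ih =>
    intro l cur acc h
    cases l with
    | nil => simp [PySem.Chars.splitOn.go]
    | cons x t =>
      simp only [PySem.Chars.splitOn.go]
      by_cases hx : x = c
      · subst hx
        have hp : [x].isPrefixOf (x :: t) = true := by simp [List.isPrefixOf]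
        simp only [hp, if_true, List.length_singleton, List.drop_one, List.tail_cons]
        rw [ih t [] (cur.reverse :: acc) (by simpa using Nat.lt_of_succ_lt_succ h)]
        simp
        omega
      · have hp : [c].isPrefixOf (x :: t) = false := by
          simp [List.isPrefixOf]
          intro hcx; exact absurd hcx.symm hx
        simp only [hp, Bool.false_eq_true, if_false]
        rw [ih t (x :: cur) acc (by simpa using Nat.lt_of_succ_lt_succ h)]
        simp [hx]

theorem splitOn_single_length (l : List Char) (c : Char) :
    (PySem.Chars.splitOn l [c]).length = l.count c + 1 := by
  rw [PySem.Chars.splitOn, splitOn_go_single_length c (l.length + 1) l [] [] (by omega)]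
  simp; omega

-- A's fold computes count '{' minus count '}'.
theorem foldl_brace (l : List Char) :
    ∀ (a : Int),
      l.foldl (fun counter ch =>
        let counter := if ch == '{' then counter + 1 else counter
        if ch == '}' then counter - 1 else counter) a
      = a + (l.count '{' : Int) - (l.count '}' : Int) := by
  induction l with
  | nil => intro a; simp
  | cons x t ih =>
    intro a
    simp only [List.foldl_cons, ih, List.count_cons]
    by_cases h1 : x = '{' <;> by_cases h2 : x = '}' <;>
      simp [h1, h2] <;> omega

-- ===== VERDICT (by name: the statement is the Claim_ definition above) =====
theorem brace_count_verify_spec : Claim_equal_brace_count_verify := by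
  intro content _
  unfold Spec_brace_count_verify brace_count_verify brace_count_verify_alt
  rw [foldl_brace, splitOn_single_length, splitOn_single_length]
  push_cast
  ring
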